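-- pv_equiv track=rewrite | github.com/travisgk/colortones | colortones/_structure/_sequential_rules.py | _find_monosyllable_series
-- ===== SOURCE A (Python) =====
-- def _find_monosyllable_series(markup_clause, inflections):
--     """
--     Returns a list of groupings of tuples that indicate a series of
--     monosyllables composed of the given <inflections>,
--     with each tuple containing:
--         - the index in the given <markup_clause> list.
--         - the subindex in the given <markup_clause> list.
--     """
--     series = [[]]
--     for i, word in enumerate(markup_clause):
--         current_series = series[-1]
--
--         """
--         Step 1) Searches for pure monosyllables:
--                     If the current series is empty or its last appended
--                     tuple was a monosyllable that came directly before
--                     the current one,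
--
--                     then the current monosyllable is appended
--                     to the current series.
--
--                     Otherwise, the current monosyllable is used to start
--                     a new series of monosyllables.
--         """
--         if len(word) == 1 and word[0] in inflections:
--             # this is a monosyllable that has a relevant inflection.
--             if len(current_series) == 0 or current_series[-1][0] == i - 1:
--                 series[-1].append((i, 0))  # part of the current series.
--             else:
--                 series.append([(i, 0)])  # starts a new series.
--             continue
--
--         if len(word) <= 1:
--             continue
--
--         """
--         Step 2) Searches for monosyllables isolated
--                 at the beginning/end of a word.
--         """
--         if word[0] in inflections and word[1] not in inflections:
--             # monosyllables are at the beginning of a word.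
--             if len(current_series) == 0 or current_series[-1][0] == i - 1:
--                 series[-1].append((i, 0))  # part of a series.
--             else:
--                 series.append([(i, 0)])  # starts a new series.
--         elif word[-1] in inflections and word[-2] not in inflections:
--             # monosyllables are at the end of a word.
--             if len(current_series) == 0 or current_series[-1][0] == i - 1:
--                 series[-1].append((i, len(word) - 1))  # part of a series.
--             else:
--                 series.append([(i, len(word) - 1)])  # starts a new series.
--     return series
-- ===== SOURCE B (Python) =====
-- def _find_monosyllable_series(markup_clause, inflections):
--     # Pass 1: classify each word into an optional (index, subindex) hit.
--     hits = []
--     for i, word in enumerate(markup_clause):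
--         if len(word) == 1 and word[0] in inflections:
--             hits.append((i, 0))
--         elif len(word) >= 2:
--             if word[0] in inflections and word[1] not in inflections:
--                 hits.append((i, 0))
--             elif word[-1] in inflections and word[-2] not in inflections:
--                 hits.append((i, len(word) - 1))
--     # Pass 2: fold the flat hit list into runs of consecutive indices.
--     series = [[]]
--     for i, sub in hits:
--         current = series[-1]
--         if len(current) == 0 or current[-1][0] == i - 1:
--             current.append((i, sub))
--         else:
--             series.append([(i, sub)])
--     return series
-- ===== Notes on version B (the rewrite author's own statement) =====
-- stated objective: simpler
-- what changed: Splits A's single loop (classification and run-grouping interleaved with three duplicated grouping sites) into two passes: a flat list of (index, subindex) hits, then one fold grouping consecutive indices into runs, with the grouping logic written once.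
import Mathlib
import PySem

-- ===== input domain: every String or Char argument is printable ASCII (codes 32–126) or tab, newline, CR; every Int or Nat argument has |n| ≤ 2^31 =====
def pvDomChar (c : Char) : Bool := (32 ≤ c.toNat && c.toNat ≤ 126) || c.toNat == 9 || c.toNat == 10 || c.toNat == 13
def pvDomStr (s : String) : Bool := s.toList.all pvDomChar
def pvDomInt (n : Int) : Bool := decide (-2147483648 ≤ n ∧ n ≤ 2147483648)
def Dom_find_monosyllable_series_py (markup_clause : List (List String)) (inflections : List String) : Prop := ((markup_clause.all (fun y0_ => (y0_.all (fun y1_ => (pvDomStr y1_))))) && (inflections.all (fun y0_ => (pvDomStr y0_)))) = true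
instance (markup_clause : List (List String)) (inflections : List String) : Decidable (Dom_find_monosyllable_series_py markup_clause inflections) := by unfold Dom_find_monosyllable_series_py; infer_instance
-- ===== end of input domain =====

-- B splits A's single loop into two passes (classify hits, then group consecutive
-- indices into runs, the grouping written once); objective: simpler.


-- ===== PORT A =====
-- A's loop body: classification and grouping interleaved, grouping written at each site
-- (series[-1] / current_series[-1] are exact via getLastD: series always holds ≥ 1 run).
def pvStepA (inflections : List String) (series : List (List (Int × Int)))
    (iw : Int × List String) : List (List (Int × Int)) :=
  if iw.2.length = 1 ∧ iw.2.getD 0 "" ∈ inflections then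
    if (series.getLastD []).length = 0 ∨ ((series.getLastD []).getLastD (0, 0)).1 = iw.1 - 1 then
      series.dropLast ++ [series.getLastD [] ++ [(iw.1, 0)]]
    else
      series ++ [[(iw.1, 0)]]
  else if iw.2.length ≤ 1 then
    series
  else if iw.2.getD 0 "" ∈ inflections ∧ iw.2.getD 1 "" ∉ inflections then
    if (series.getLastD []).length = 0 ∨ ((series.getLastD []).getLastD (0, 0)).1 = iw.1 - 1 then
      series.dropLast ++ [series.getLastD [] ++ [(iw.1, 0)]]
    else
      series ++ [[(iw.1, 0)]]
  else if iw.2.getD (iw.2.length - 1) "" ∈ inflections ∧ iw.2.getD (iw.2.length - 2) "" ∉ inflections then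
    if (series.getLastD []).length = 0 ∨ ((series.getLastD []).getLastD (0, 0)).1 = iw.1 - 1 then
      series.dropLast ++ [series.getLastD [] ++ [(iw.1, (iw.2.length : Int) - 1)]]
    else
      series ++ [[(iw.1, (iw.2.length : Int) - 1)]]
  else
    series

def find_monosyllable_series_py (markup_clause : List (List String)) (inflections : List String) : List (List (Int × Int)) :=
  (PySem.List.enumerate markup_clause).foldl (pvStepA inflections) [[]]

-- ===== PORT B =====
-- Pass 1 classifier: the optional hit contributed by word number i.
def pvClassify (inflections : List String) (i : Int) (word : List String) : Option (Int × Int) :=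
  if word.length = 1 ∧ word.getD 0 "" ∈ inflections then
    some (i, 0)
  else if 2 ≤ word.length then
    if word.getD 0 "" ∈ inflections ∧ word.getD 1 "" ∉ inflections then
      some (i, 0)
    else if word.getD (word.length - 1) "" ∈ inflections ∧ word.getD (word.length - 2) "" ∉ inflections then
      some (i, (word.length : Int) - 1)
    else
      none
  else
    none

-- Pass 2 step: extends the current run when the index is consecutive, else opens a new run.
def pvPushHit (series : List (List (Int × Int))) (hit : Int × Int) : List (List (Int × Int)) :=
  if (series.getLastD []).length = 0 ∨ ((series.getLastD []).getLastD (0, 0)).1 = hit.1 - 1 then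
    series.dropLast ++ [series.getLastD [] ++ [hit]]
  else
    series ++ [[hit]]

def find_monosyllable_series_py_alt (markup_clause : List (List String)) (inflections : List String) : List (List (Int × Int)) :=
  let hits := (PySem.List.enumerate markup_clause).filterMap (fun iw => pvClassify inflections iw.1 iw.2)
  hits.foldl pvPushHit [[]]

-- ===== PRECONDITION & SPEC =====
def Spec_find_monosyllable_series_py (markup_clause : List (List String)) (inflections : List String) (out : List (List (Int × Int))) : Prop := out = find_monosyllable_series_py_alt markup_clause inflections
instance (markup_clause : List (List String)) (inflections : List String) (out : List (List (Int × Int))) : Decidable (Spec_find_monosyllable_series_py markup_clause inflections out) := by unfold Spec_find_monosyllable_series_py; infer_instance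

-- ===== CLAIM (what is proved, stated in full; the proofs are below) =====
def Claim_equal_find_monosyllable_series_py : Prop := ∀ (markup_clause : List (List String)) (inflections : List String), Dom_find_monosyllable_series_py markup_clause inflections → Spec_find_monosyllable_series_py markup_clause inflections (find_monosyllable_series_py markup_clause inflections)

-- ===== LEMMAS AND PROOFS =====
-- A's loop body is the classifier followed by the grouping step.
theorem pvStepA_eq (inflections : List String) (series : List (List (Int × Int)))
    (iw : Int × List String) :
    pvStepA inflections series iw =
      match pvClassify inflections iw.1 iw.2 with
      | none => series
      | some h => pvPushHit series h := by
  unfold pvStepA pvClassify pvPushHit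
  by_cases h1 : iw.2.length = 1 ∧ iw.2.getD 0 "" ∈ inflections
  · rw [if_pos h1, if_pos h1]
  · rw [if_neg h1, if_neg h1]
    by_cases hlen : iw.2.length ≤ 1
    · rw [if_pos hlen, if_neg (by omega : ¬ 2 ≤ iw.2.length)]
    · rw [if_neg hlen, if_pos (by omega : 2 ≤ iw.2.length)]
      by_cases hb : iw.2.getD 0 "" ∈ inflections ∧ iw.2.getD 1 "" ∉ inflections
      · rw [if_pos hb, if_pos hb]
      · rw [if_neg hb, if_neg hb]
        by_cases he : iw.2.getD (iw.2.length - 1) "" ∈ inflections ∧ iw.2.getD (iw.2.length - 2) "" ∉ inflections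
        · rw [if_pos he, if_pos he]
        · rw [if_neg he, if_neg he]

-- Folding A's step over the words equals folding the grouping step over the classified hits.
theorem pvFold_eq (inflections : List String) :
    ∀ (l : List (Int × List String)) (s : List (List (Int × Int))),
      l.foldl (pvStepA inflections) s =
        (l.filterMap (fun iw => pvClassify inflections iw.1 iw.2)).foldl pvPushHit s := by
  intro l
  induction l with
  | nil => intro s; simp
  | cons a t ih =>
    intro s
    rw [List.foldl_cons, List.filterMap_cons, pvStepA_eq]
    cases h : pvClassify inflections a.1 a.2 with
    | none => simp [ih]
    | some v => simp [ih]

-- ===== VERDICT (by name: the statement is the Claim_ definition above) =====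
theorem find_monosyllable_series_py_spec : Claim_equal_find_monosyllable_series_py := by
  intro markup_clause inflections _
  unfold Spec_find_monosyllable_series_py find_monosyllable_series_py find_monosyllable_series_py_alt
  exact pvFold_eq inflections (PySem.List.enumerate markup_clause) [[]]
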